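-- pv_equiv track=rewrite | github.com/sohom070994/2023.0039 | scripts/Solver_comparison.py | feas_limit
-- ===== SOURCE A (Python) =====
-- import math
--
-- def feas_limit(lv):
--     """This function takes as input the arrival vector and returns final_vec.
--         Each item in final_vec represents the node till which we construct edges for that index in the graph.
--         eg., final_vec[i]=j represents that in the graph, each node from i to j-1 will have a node to j.
--
--     Parameters
--     ----------
--     lambda_vec : list
--
--     Returns
--     -------
--     final_vec : list
--     """
--     slots = len(lv)
--     slot_vec=[i+math.floor(1/lv[i]) if lv[i]!=0 else 1000 for i in range(slots)]
--     low_lim=0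
--     final_vec=[]
--     while len(final_vec)<slots:
--         mn=min(slot_vec[low_lim:])
--         argmin=(slot_vec[low_lim:]).index(mn)+len(slot_vec[:low_lim])
--         hm=argmin-low_lim+1
--         final_vec=final_vec+[mn]*hm
--         low_lim=low_lim+hm
--     return final_vec[0:slots]
-- ===== SOURCE B (Python) =====
-- import math
--
-- def feas_limit(lv):
--     """Partition positions into segments by suffix minima of the slot vector:
--     one right-to-left pass computing (suffix minimum, first argmin) per index,
--     then one left-to-right fill.  O(n)."""
--     n = len(lv)
--     slot = [i + math.floor(1 / v) if v != 0 else 1000 for i, v in enumerate(lv)]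
--     suf = [None] * n  # suf[i] = (min of slot[i:], smallest argmin index)
--     best = bi = None
--     for i in range(n - 1, -1, -1):
--         if bi is None or slot[i] <= best:
--             best, bi = slot[i], i
--         suf[i] = (best, bi)
--     out = []
--     i = 0
--     while i < n:
--         m, j = suf[i]
--         out += [m] * (j - i + 1)
--         i = j + 1
--     return out
-- ===== Notes on version B (the rewrite author's own statement) =====
-- stated objective: faster
-- what changed: replaces A's quadratic while-loop that re-scans the remaining suffix with min() and .index() each round by one right-to-left pass precomputing (suffix minimum, first argmin) per index and one linear fill pass
import Mathlib
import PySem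

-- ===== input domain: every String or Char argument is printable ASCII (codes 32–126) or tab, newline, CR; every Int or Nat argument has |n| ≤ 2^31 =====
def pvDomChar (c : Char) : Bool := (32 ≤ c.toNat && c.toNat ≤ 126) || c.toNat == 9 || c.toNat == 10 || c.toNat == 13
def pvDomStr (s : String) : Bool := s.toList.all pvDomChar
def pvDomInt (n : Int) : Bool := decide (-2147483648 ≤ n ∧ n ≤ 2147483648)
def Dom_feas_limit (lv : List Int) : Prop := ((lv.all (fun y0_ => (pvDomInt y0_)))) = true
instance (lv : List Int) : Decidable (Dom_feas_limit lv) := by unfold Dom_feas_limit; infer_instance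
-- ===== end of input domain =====

-- B precomputes the suffix-min/first-argmin table in one right-to-left pass and fills the
-- result in one left-to-right pass, where A rescans the remaining suffix with min()/.index()
-- on every round; same return value everywhere (timing label: see the check's measurement).

-- math.floor(1/x) for an int x ≠ 0: exact for |x| ≤ 2^31 (1/x never underflows there)
def pvFloorInv (x : Int) : Int := if x = 1 then 1 else if 0 < x then 0 else -1

-- ===== PORT A =====
-- slot_vec = [i+math.floor(1/lv[i]) if lv[i]!=0 else 1000 for i in range(slots)]
def pvSlotVec (lv : List Int) : List Int :=
  (PySem.List.pyRange 0 (PySem.List.len lv) 1).map (fun i =>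
    if PySem.List.pyGetD lv i 0 ≠ 0 then i + pvFloorInv (PySem.List.pyGetD lv i 0) else 1000)

-- the while loop; fuel = slots+1 bounds the iteration count (each round appends ≥ 1 element)
def pvLoopA (slot_vec : List Int) (slots : Nat) : Nat → Int → List Int → List Int
  | 0, _, final_vec => final_vec
  | fuel+1, low_lim, final_vec =>
    if final_vec.length < slots then
      match PySem.List.min? (PySem.List.slice slot_vec (some low_lim) none) (fun y => y) with
      | none => final_vec   -- unreachable: min() of a nonempty suffix
      | some mn =>
        match PySem.List.index? (PySem.List.slice slot_vec (some low_lim) none) mn with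
        | none => final_vec -- unreachable: mn occurs in the suffix
        | some idx =>
          let argmin : Int := (idx : Int) + PySem.List.len (PySem.List.slice slot_vec none (some low_lim))
          let hm : Int := argmin - low_lim + 1
          pvLoopA slot_vec slots fuel (low_lim + hm) (final_vec ++ PySem.List.pyRepeat [mn] hm)
    else final_vec

def feas_limit (lv : List Int) : List Int :=
  let slots := lv.length
  let final_vec := pvLoopA (pvSlotVec lv) slots (slots + 1) 0 []
  PySem.List.slice final_vec none (some (slots : Int))

-- ===== PORT B =====
-- slot = [i + math.floor(1 / v) if v != 0 else 1000 for i, v in enumerate(lv)]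
def pvSlotB (lv : List Int) : List Int :=
  (PySem.List.enumerate lv).map (fun p =>
    if p.2 ≠ 0 then p.1 + pvFloorInv p.2 else 1000)

-- right-to-left pass: for i in range(n-1,-1,-1) fill suf[i] = (best, bi); state (best, bi)
-- is carried as Option (none = Python's initial None), entries are prepended
def pvSufAux (slot : List Int) : Nat → Option (Int × Int) → List (Int × Int) → List (Int × Int)
  | 0, _, acc => acc
  | i+1, cur, acc =>
    let s := PySem.List.pyGetD slot (i : Int) 0
    let best : Int × Int :=
      match cur with
      | none => (s, (i : Int))
      | some (b, bi) => if s ≤ b then (s, (i : Int)) else (b, bi)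
    pvSufAux slot i (some best) (best :: acc)

-- the while loop over i; fuel = n+1 bounds the iteration count (i strictly increases)
def pvEmit (suf : List (Int × Int)) (n : Nat) : Nat → Int → List Int → List Int
  | 0, _, out => out
  | fuel+1, i, out =>
    if i < (n : Int) then
      match PySem.List.pyGet? suf i with
      | none => out       -- unreachable: 0 ≤ i < n
      | some (m, j) => pvEmit suf n fuel (j + 1) (out ++ PySem.List.pyRepeat [m] (j - i + 1))
    else out

def feas_limit_alt (lv : List Int) : List Int :=
  let n := lv.length
  pvEmit (pvSufAux (pvSlotB lv) n none []) n (n + 1) 0 []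

-- ===== PRECONDITION & SPEC =====
def Spec_feas_limit (lv : List Int) (out : List Int) : Prop := out = feas_limit_alt lv
instance (lv : List Int) (out : List Int) : Decidable (Spec_feas_limit lv out) := by unfold Spec_feas_limit; infer_instance

-- ===== CLAIM (what is proved, stated in full; the proofs are below) =====
def Claim_equal_feas_limit : Prop := ∀ (lv : List Int), Dom_feas_limit lv → Spec_feas_limit lv (feas_limit lv)

-- ===== LEMMAS AND PROOFS =====

-- (minimum value, index of its first occurrence) of a list, structurally
def pvMF : List Int → Option (Int × Nat)
  | [] => none
  | x :: xs =>
    match pvMF xs with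
    | none => some (x, 0)
    | some (b, k) => if x ≤ b then some (x, 0) else some (b, k + 1)

-- the common reference result: segments of suffix minima
def pvSegs : List Int → List Int
  | [] => []
  | x :: xs =>
    match pvMF (x :: xs) with
    | none => []
    | some (m, k) => List.replicate (k + 1) m ++ pvSegs (xs.drop k)
  termination_by t => t.length
  decreasing_by simp

theorem pvMF_cons_eq_none (x : Int) (xs : List Int) : pvMF (x :: xs) ≠ none := by
  unfold pvMF
  cases pvMF xs with
  | none => simp
  | some p => obtain ⟨b, k⟩ := p; dsimp only; split <;> simp

theorem pvMF_k_lt {t : List Int} {m : Int} {k : Nat} (h : pvMF t = some (m, k)) :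
    k < t.length := by
  induction t generalizing m k with
  | nil => simp [pvMF] at h
  | cons x xs ih =>
    unfold pvMF at h
    cases hx : pvMF xs with
    | none =>
      rw [hx] at h; simp at h
      simp only [List.length_cons]; omega
    | some p =>
      obtain ⟨b, k'⟩ := p
      rw [hx] at h
      by_cases hle : x ≤ b <;> simp [hle] at h <;> obtain ⟨-, hk⟩ := h <;>
        simp only [List.length_cons]
      · omega
      · have := ih hx; omega

theorem pv_foldl_min_comm (l : List Int) (a b : Int) :
    l.foldl min (min a b) = min a (l.foldl min b) := by
  induction l generalizing b with
  | nil => simp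
  | cons y ys ih => simp only [List.foldl_cons, min_assoc, ih]

theorem pvMF_fst {x : Int} {xs : List Int} {m : Int} {k : Nat}
    (h : pvMF (x :: xs) = some (m, k)) : m = xs.foldl min x := by
  induction xs generalizing x m k with
  | nil => simp [pvMF] at h; simp [h.1]
  | cons y ys ih =>
    unfold pvMF at h
    cases hy : pvMF (y :: ys) with
    | none => exact absurd hy (pvMF_cons_eq_none y ys)
    | some p =>
      obtain ⟨b, k'⟩ := p
      have hb : b = ys.foldl min y := ih hy
      rw [hy] at h
      simp only [List.foldl_cons]
      have hcomm : ys.foldl min (min x y) = min x b := by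
        rw [pv_foldl_min_comm, ← hb]
      rw [hcomm]
      by_cases hle : x ≤ b <;> simp [hle] at h <;> rw [← h.1] <;> omega

theorem pvMF_min? {t : List Int} {m : Int} {k : Nat} (h : pvMF t = some (m, k)) :
    PySem.List.min? t (fun y => y) = some m := by
  cases t with
  | nil => simp [pvMF] at h
  | cons x xs => rw [PySem.List.min?_id_cons, pvMF_fst h]

theorem pvMF_index? {t : List Int} {m : Int} {k : Nat} (h : pvMF t = some (m, k)) :
    PySem.List.index? t m = some k := by
  induction t generalizing m k with
  | nil => simp [pvMF] at h
  | cons x xs ih =>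
    unfold pvMF at h
    cases hx : pvMF xs with
    | none =>
      rw [hx] at h; simp at h
      rw [← h.1, ← h.2]
      exact PySem.List.index?_cons_self x xs
    | some p =>
      obtain ⟨b, k'⟩ := p
      rw [hx] at h
      by_cases hle : x ≤ b <;> simp [hle] at h
      · rw [← h.1, ← h.2]
        exact PySem.List.index?_cons_self x xs
      · have hne : x ≠ m := by omega
        rw [PySem.List.index?_cons_of_ne xs hne, ih (h.1 ▸ hx), ← h.2]
        rfl

theorem pvSegs_nil : pvSegs [] = [] := by simp only [pvSegs]

theorem pvSegs_step {t : List Int} {m : Int} {k : Nat} (h : pvMF t = some (m, k)) :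
    pvSegs t = List.replicate (k + 1) m ++ pvSegs (t.drop (k + 1)) := by
  cases t with
  | nil => simp [pvMF] at h
  | cons x xs =>
    rw [pvSegs, h]
    simp [List.drop_succ_cons]

theorem pvSegs_length_aux : ∀ (n : Nat) (t : List Int), t.length ≤ n → (pvSegs t).length = t.length := by
  intro n
  induction n with
  | zero =>
    intro t h
    have ht : t = [] := List.eq_nil_of_length_eq_zero (by omega)
    rw [ht, pvSegs_nil]
  | succ n ih =>
    intro t h
    cases t with
    | nil => rw [pvSegs_nil]
    | cons x xs =>
      cases hmf : pvMF (x :: xs) with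
      | none => exact absurd hmf (pvMF_cons_eq_none x xs)
      | some p =>
        obtain ⟨m, k⟩ := p
        have hk := pvMF_k_lt hmf
        rw [pvSegs_step hmf]
        simp only [List.length_append, List.length_replicate]
        rw [ih ((x :: xs).drop (k + 1)) (by simp; simp at h; omega)]
        simp at hk ⊢
        omega

theorem pvSegs_length (t : List Int) : (pvSegs t).length = t.length :=
  pvSegs_length_aux t.length t le_rfl

-- ---- A's loop computes pvSegs of the remaining suffix ----
theorem pvLoopA_eq (s : List Int) (fuel low : Nat) (final : List Int)
    (hlen : final.length = low) (hle : low ≤ s.length) (hfuel : s.length - low < fuel) :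
    pvLoopA s s.length fuel (low : Int) final = final ++ pvSegs (s.drop low) := by
  induction fuel generalizing low final with
  | zero => omega
  | succ f ih =>
    unfold pvLoopA
    by_cases hlt : final.length < s.length
    · simp only [if_pos hlt]
      have hlow : low < s.length := by omega
      have hne : s.drop low ≠ [] := by
        intro hc; have := congrArg List.length hc; simp at this; omega
      cases hmf : pvMF (s.drop low) with
      | none =>
        cases hd : s.drop low with
        | nil => exact absurd hd hne
        | cons a as => rw [hd] at hmf; exact absurd hmf (pvMF_cons_eq_none a as)
      | some p =>
        obtain ⟨m, k⟩ := p
        have hk : k < s.length - low := by have := pvMF_k_lt hmf; simp at this; omega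
        simp only [PySem.List.slice_from_natCast, pvMF_min? hmf, pvMF_index? hmf,
          PySem.List.slice_to_natCast, PySem.List.len_eq, List.length_take]
        have hminlen : ((min low s.length : Nat) : Int) = (low : Int) := by
          simp; omega
        rw [hminlen]
        have harg : (k : Int) + (low : Int) - (low : Int) + 1 = ((k + 1 : Nat) : Int) := by
          push_cast; ring
        rw [harg, PySem.List.pyRepeat_singleton]
        have htoNat : ((k + 1 : Nat) : Int).toNat = k + 1 := by omega
        have hlow' : (low : Int) + ((k + 1 : Nat) : Int) = ((low + (k + 1) : Nat) : Int) := by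
          push_cast; ring
        rw [htoNat, hlow',
          ih (low + (k + 1)) (final ++ List.replicate (k + 1) m) (by simp [hlen]) (by omega) (by omega),
          pvSegs_step hmf, List.drop_drop, List.append_assoc]
    · simp only [if_neg hlt]
      have hlow : low = s.length := by omega
      rw [hlow, List.drop_length, pvSegs_nil, List.append_nil]

-- ---- B's slot list equals A's ----
theorem pvSlotB_eq (lv : List Int) : pvSlotB lv = pvSlotVec lv := by
  rw [pvSlotB, pvSlotVec, PySem.List.enumerate_eq_map_pyRange lv 0, List.map_map]
  rfl

-- ---- B's table: pvSufAux builds (min, first argmin) of every suffix of the slot list ----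

-- the table entry for index i (the default is never used: drop i is nonempty for i < n)
def pvG (s : List Int) (i : Nat) : Int × Int :=
  ((pvMF (s.drop i)).map (fun p => (p.1, ((i + p.2 : Nat) : Int)))).getD (0, 0)

theorem pvStep (s : List Int) (i : Nat) (hi : i < s.length) :
    ((match (pvMF (s.drop (i+1))).map (fun p => (p.1, ((i + 1 + p.2 : Nat) : Int))) with
      | none => ((s[i]'hi), (i : Int))
      | some (b, bi) => if (s[i]'hi) ≤ b then ((s[i]'hi), (i : Int)) else (b, bi))
      = pvG s i) ∧
    some (pvG s i) = (pvMF (s.drop i)).map (fun p => (p.1, ((i + p.2 : Nat) : Int))) := by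
  have hcons : s.drop i = s[i]'hi :: s.drop (i + 1) := (List.getElem_cons_drop hi).symm
  unfold pvG
  rw [hcons, pvMF]
  cases hmf : pvMF (s.drop (i+1)) with
  | none => simp
  | some p =>
    obtain ⟨b, k⟩ := p
    by_cases hle : s[i]'hi ≤ b
    · simp [hle]
    · simp [hle]; omega

theorem pvSufAux_eq (s : List Int) (i : Nat) (hi : i ≤ s.length) (acc : List (Int × Int)) :
    pvSufAux s i ((pvMF (s.drop i)).map (fun p => (p.1, ((i + p.2 : Nat) : Int)))) acc
      = (List.range i).map (pvG s) ++ acc := by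
  induction i generalizing acc with
  | zero => simp [pvSufAux]
  | succ i ih =>
    have hi' : i < s.length := by omega
    unfold pvSufAux
    have hv : PySem.List.pyGetD s (i : Int) 0 = s[i]'hi' := by
      rw [PySem.List.pyGetD_natCast]; exact List.getD_eq_getElem s 0 hi'
    simp only [hv]
    rw [(pvStep s i hi').1, (pvStep s i hi').2, ih (by omega), List.range_succ]
    simp

-- ---- B's emit loop computes pvSegs of the remaining suffix ----
theorem pvEmit_eq (s : List Int) (fuel i : Nat) (out : List Int)
    (hi : i ≤ s.length) (hfuel : s.length - i < fuel) :
    pvEmit ((List.range s.length).map (pvG s)) s.length fuel (i : Int) out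
      = out ++ pvSegs (s.drop i) := by
  induction fuel generalizing i out with
  | zero => omega
  | succ f ih =>
    unfold pvEmit
    by_cases hlt : i < s.length
    · simp only [if_pos (show (i : Int) < (s.length : Nat) by exact_mod_cast hlt)]
      have hne : s.drop i ≠ [] := by
        intro hc; have := congrArg List.length hc; simp at this; omega
      cases hmf : pvMF (s.drop i) with
      | none =>
        cases hd : s.drop i with
        | nil => exact absurd hd hne
        | cons a as => rw [hd] at hmf; exact absurd hmf (pvMF_cons_eq_none a as)
      | some p =>
        obtain ⟨m, k⟩ := p
        have hk : k < s.length - i := by have := pvMF_k_lt hmf; simp at this; omega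
        have hget : PySem.List.pyGet? ((List.range s.length).map (pvG s)) (i : Int)
            = some (pvG s i) := by
          rw [PySem.List.pyGet?_natCast]
          simp [hlt]
        have hg : pvG s i = (m, ((i + k : Nat) : Int)) := by simp [pvG, hmf]
        simp only [hget, hg]
        rw [PySem.List.pyRepeat_singleton]
        have h1 : ((i + k : Nat) : Int) - (i : Int) + 1 = ((k + 1 : Nat) : Int) := by push_cast; ring
        have h2 : ((i + k : Nat) : Int) + 1 = ((i + k + 1 : Nat) : Int) := by push_cast; ring
        have htoNat : ((k + 1 : Nat) : Int).toNat = k + 1 := by omega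
        rw [h1, h2, htoNat,
          ih (i + k + 1) _ (by omega) (by omega),
          pvSegs_step hmf, List.drop_drop, List.append_assoc]
        rfl
    · simp only [if_neg (show ¬ (i : Int) < (s.length : Nat) by exact_mod_cast hlt)]
      have hieq : i = s.length := by omega
      rw [hieq, List.drop_length, pvSegs_nil, List.append_nil]

-- ===== VERDICT (by name: the statement is the Claim_ definition above) =====
theorem feas_limit_spec : Claim_equal_feas_limit := by
  intro lv _
  unfold Spec_feas_limit feas_limit feas_limit_alt
  have hslen : (pvSlotVec lv).length = lv.length := by
    simp [pvSlotVec, PySem.List.len_eq, PySem.List.length_pyRange_one]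
  have hA : pvLoopA (pvSlotVec lv) lv.length (lv.length + 1) 0 [] = pvSegs (pvSlotVec lv) := by
    have := pvLoopA_eq (pvSlotVec lv) (lv.length + 1) 0 [] rfl (by omega) (by omega)
    rw [hslen] at this
    simpa using this
  have hB : pvSufAux (pvSlotB lv) lv.length none []
      = (List.range lv.length).map (pvG (pvSlotVec lv)) := by
    rw [pvSlotB_eq]
    have h0 : ((pvMF ((pvSlotVec lv).drop lv.length)).map
        (fun p => (p.1, ((lv.length + p.2 : Nat) : Int)))) = none := by
      rw [← hslen, List.drop_length]
      rfl
    have := pvSufAux_eq (pvSlotVec lv) lv.length (by omega) []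
    rw [h0] at this
    simpa using this
  have hE : pvEmit ((List.range lv.length).map (pvG (pvSlotVec lv))) lv.length (lv.length + 1) 0 []
      = pvSegs (pvSlotVec lv) := by
    have := pvEmit_eq (pvSlotVec lv) (lv.length + 1) 0 [] (by omega) (by omega)
    rw [hslen] at this
    simpa using this
  simp only [hA, hB, hE]
  rw [show ((lv.length : Nat) : Int) = ((lv.length : Nat) : Int) from rfl,
    PySem.List.slice_to_natCast]
  apply List.take_of_length_le
  rw [pvSegs_length, hslen]
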